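-- pv_equiv track=rewrite | github.com/thu-coai/CrossWOZ | convlab2/nlu/svm/Tuples.py | makes_valid_act
-- ===== SOURCE A (Python) =====
-- def makes_valid_act(tuples):
--     # check if uacts is a valid list of tuples
--     # - can't affirm and negate
--     # - can't deny and inform same thing
--     # - can't inform(a=x) inform(a=y) if x!=u
--     singles = [t for t in tuples if len(t)==1]
--     if ("affirm",) in tuples and ("negate",) in tuples :
--         return False
--     triples = [t for t in tuples if len(t)==3]
--     informed = [(slot, value) for act,slot,value in triples if act=="inform"]
--     denied   = [(slot, value) for act,slot,value in triples if act=="deny"  ]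
--     for s,v in informed:
--         if (s,v) in denied:
--             return False
--     informed_slots = [slot for slot, _value in informed]
--     if len(informed_slots) != len(set(informed_slots)) :
--         return False
--     return True
-- ===== SOURCE B (Python) =====
-- def makes_valid_act(tuples):
--     # One pass with a slot->value dict, a denied-pair set and affirm/negate flags,
--     # returning False at the first inform/deny conflict or duplicate informed slot.
--     affirm_seen = False
--     negate_seen = False
--     informed = {}          # slot -> value
--     denied = set()         # (slot, value) pairs
--     for t in tuples:
--         if len(t) == 1:
--             if t[0] == "affirm":
--                 affirm_seen = True
--             elif t[0] == "negate":
--                 negate_seen = True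
--         elif len(t) == 3:
--             act, slot, value = t
--             if act == "inform":
--                 if slot in informed or (slot, value) in denied:
--                     return False
--                 informed[slot] = value
--             elif act == "deny":
--                 if informed.get(slot) == value:
--                     return False
--                 denied.add((slot, value))
--     return not (affirm_seen and negate_seen)
-- ===== Notes on version B (the rewrite author's own statement) =====
-- stated objective: alternative
-- what changed: B replaces A's four separate comprehension passes plus quadratic list-membership scans with a single pass over tuples maintaining a slot->value dict, a denied-pair set and affirm/negate flags, returning False at the first conflict.
import Mathlib
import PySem

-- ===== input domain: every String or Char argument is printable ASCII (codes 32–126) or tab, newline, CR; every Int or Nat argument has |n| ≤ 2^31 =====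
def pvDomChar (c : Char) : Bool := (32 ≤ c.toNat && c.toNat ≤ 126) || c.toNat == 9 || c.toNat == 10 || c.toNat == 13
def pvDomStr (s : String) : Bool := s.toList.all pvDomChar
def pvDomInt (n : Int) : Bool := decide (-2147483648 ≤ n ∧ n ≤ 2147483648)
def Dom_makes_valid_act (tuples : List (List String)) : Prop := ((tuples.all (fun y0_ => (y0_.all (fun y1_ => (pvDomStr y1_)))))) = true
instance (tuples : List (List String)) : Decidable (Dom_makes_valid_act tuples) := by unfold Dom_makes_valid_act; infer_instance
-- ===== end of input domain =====

-- B replaces A's four list comprehensions and quadratic membership scans by one pass over the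
-- input keeping a slot→value dict, a denied-pair set and affirm/negate flags, with early exit.

-- ===== PORT A =====
-- A-side helper: the body of A's two triple comprehensions ('(slot, value) for act,slot,value in triples if act==X')
def pvTripleGet (x : String) (t : List String) : Option (String × String) :=
  match t with
  | act :: rest =>
    match rest with
    | [slot, value] => if act == x then some (slot, value) else none
    | _ => none
  | [] => none

def makes_valid_act (tuples : List (List String)) : Bool :=
  let _singles := tuples.filter (fun t => t.length == 1)
  if tuples.contains ["affirm"] && tuples.contains ["negate"] then false
  else
    let triples := tuples.filter (fun t => t.length == 3)
    let informed := triples.filterMap (pvTripleGet "inform")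
    let denied := triples.filterMap (pvTripleGet "deny")
    -- for s,v in informed: if (s,v) in denied: return False
    if informed.any (fun sv => denied.contains sv) then false
    else
      let informed_slots := informed.map (fun sv => sv.1)
      if informed_slots.length != (PySem.Set.ofList informed_slots).length then false
      else true

-- ===== PORT B =====
def pvAltLoop (ts : List (List String)) (affirm_seen negate_seen : Bool)
    (informed : PySem.Dict String String) (denied : PySem.Set (String × String)) : Bool :=
  match ts with
  | [] => !(affirm_seen && negate_seen)
  | t :: rest =>
    match t with
    | [x] =>
      if x == "affirm" then pvAltLoop rest true negate_seen informed denied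
      else if x == "negate" then pvAltLoop rest affirm_seen true informed denied
      else pvAltLoop rest affirm_seen negate_seen informed denied
    | [act, slot, value] =>
      if act == "inform" then
        if informed.contains slot || denied.contains (slot, value) then false
        else pvAltLoop rest affirm_seen negate_seen (informed.insert slot value) denied
      else if act == "deny" then
        if informed.get? slot == some value then false
        else pvAltLoop rest affirm_seen negate_seen informed (PySem.Set.add denied (slot, value))
      else pvAltLoop rest affirm_seen negate_seen informed denied
    | _ => pvAltLoop rest affirm_seen negate_seen informed denied

def makes_valid_act_alt (tuples : List (List String)) : Bool :=
  pvAltLoop tuples false false PySem.Dict.empty PySem.Set.empty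

-- ===== PRECONDITION & SPEC =====
def Spec_makes_valid_act (tuples : List (List String)) (out : Bool) : Prop :=
  out = makes_valid_act_alt tuples
instance (tuples : List (List String)) (out : Bool) : Decidable (Spec_makes_valid_act tuples out) := by
  unfold Spec_makes_valid_act; infer_instance

-- ===== CLAIM (what is proved, stated in full; the proofs are below) =====
def Claim_equal_makes_valid_act : Prop := ∀ (tuples : List (List String)), Dom_makes_valid_act tuples → Spec_makes_valid_act tuples (makes_valid_act tuples)

-- ===== LEMMAS AND PROOFS =====

def pvInforms : List (List String) → List (String × String)
  | [] => []
  | t :: rest =>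
    match t with
    | [act, slot, value] => if act = "inform" then (slot, value) :: pvInforms rest else pvInforms rest
    | _ => pvInforms rest

def pvDenies : List (List String) → List (String × String)
  | [] => []
  | t :: rest =>
    match t with
    | [act, slot, value] => if act = "deny" then (slot, value) :: pvDenies rest else pvDenies rest
    | _ => pvDenies rest

lemma filt_informs (ts : List (List String)) :
    ((ts.filter (fun t => t.length == 3)).filterMap (pvTripleGet "inform")) = pvInforms ts := by
  induction ts with
  | nil => rfl
  | cons t rest ih =>
    rcases t with _ | ⟨a, _ | ⟨b, _ | ⟨c, _ | ⟨e, r⟩⟩⟩⟩ <;>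
      simp [List.filter_cons, List.filterMap_cons, pvTripleGet, pvInforms, ih] <;>
      (try (by_cases h : a = "inform" <;> simp [h])) <;> (try simpa [pvTripleGet] using ih)

lemma filt_denies (ts : List (List String)) :
    ((ts.filter (fun t => t.length == 3)).filterMap (pvTripleGet "deny")) = pvDenies ts := by
  induction ts with
  | nil => rfl
  | cons t rest ih =>
    rcases t with _ | ⟨a, _ | ⟨b, _ | ⟨c, _ | ⟨e, r⟩⟩⟩⟩ <;>
      simp [List.filter_cons, List.filterMap_cons, pvTripleGet, pvDenies, ih] <;>
      (try (by_cases h : a = "deny" <;> simp [h])) <;> (try simpa [pvTripleGet] using ih)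

lemma len_ofList_lt {α : Type} [BEq α] [LawfulBEq α] (xs : List α) (h : ¬ xs.Nodup) :
    (PySem.Set.ofList xs).length < xs.length := by
  induction xs with
  | nil => simp at h
  | cons x xs ih =>
    rw [PySem.Set.ofList_cons]
    simp only [List.length_cons]
    by_cases hx : x ∈ xs
    · have hmem : x ∈ PySem.Set.ofList xs := by simp [PySem.Set.mem_ofList, hx]
      have h1 : (PySem.Set.discard (PySem.Set.ofList xs) x).length < (PySem.Set.ofList xs).length := by
        unfold PySem.Set.discard
        rw [List.length_filter_lt_length_iff_exists]
        exact ⟨x, hmem, by simp⟩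
      have h2 := PySem.Set.length_ofList_le xs
      omega
    · have hnd : ¬ xs.Nodup := by
        intro hn; exact h (List.nodup_cons.mpr ⟨hx, hn⟩)
      have h1 : (PySem.Set.discard (PySem.Set.ofList xs) x).length ≤ (PySem.Set.ofList xs).length :=
        List.length_filter_le _ _
      have := ih hnd
      omega

lemma len_ofList_eq_iff {α : Type} [BEq α] [LawfulBEq α] (xs : List α) :
    ((PySem.Set.ofList xs).length = xs.length) ↔ xs.Nodup := by
  constructor
  · intro h
    by_contra hn
    exact absurd h (Nat.ne_of_lt (len_ofList_lt xs hn))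
  · intro h; rw [PySem.Set.ofList_eq_self_of_nodup _ h]

lemma pvInforms_triple (a b c : String) (rest : List (List String)) :
    pvInforms ([a, b, c] :: rest) =
      if a = "inform" then (b, c) :: pvInforms rest else pvInforms rest := rfl

lemma pvDenies_triple (a b c : String) (rest : List (List String)) :
    pvDenies ([a, b, c] :: rest) =
      if a = "deny" then (b, c) :: pvDenies rest else pvDenies rest := rfl

theorem pvAltLoop_eq (ts : List (List String)) (aff neg : Bool)
    (d : PySem.Dict String String) (den : PySem.Set (String × String))
    (hk : d.keys.Nodup) (hc : ∀ p ∈ d.items, p ∉ den) :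
    pvAltLoop ts aff neg d den =
      if (∃ p ∈ d.items ++ pvInforms ts, p ∈ den ∨ p ∈ pvDenies ts)
          ∨ ¬ ((d.items ++ pvInforms ts).map Prod.fst).Nodup
      then false
      else !((aff || decide (["affirm"] ∈ ts)) && (neg || decide (["negate"] ∈ ts))) := by
  induction ts generalizing aff neg d den with
  | nil =>
    rw [if_neg]
    · simp [pvAltLoop]
    rintro (⟨p, hp, hpd | hpd⟩ | hnd)
    · simp only [pvInforms, List.append_nil] at hp
      exact hc p hp hpd
    · simp [pvDenies] at hpd
    · simp only [pvInforms, List.append_nil] at hnd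
      exact hnd hk
  | cons t rest ih =>
    rcases t with _ | ⟨a, _ | ⟨b, _ | ⟨c, _ | ⟨e, r⟩⟩⟩⟩
    · simpa [pvAltLoop, pvInforms, pvDenies] using ih aff neg d den hk hc
    · -- singleton [a]
      by_cases ha : a = "affirm"
      · subst ha
        simpa [pvAltLoop, pvInforms, pvDenies] using ih true neg d den hk hc
      · by_cases hn : a = "negate"
        · subst hn
          simpa [pvAltLoop, pvInforms, pvDenies] using ih aff true d den hk hc
        · have ha' : ¬ ("affirm" = a) := fun h => ha h.symm
          have hn' : ¬ ("negate" = a) := fun h => hn h.symm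
          simpa [pvAltLoop, pvInforms, pvDenies, ha, hn, ha', hn', List.mem_cons]
            using ih aff neg d den hk hc
    · simpa [pvAltLoop, pvInforms, pvDenies] using ih aff neg d den hk hc
    · -- triple [a, b, c]
      by_cases hi : a = "inform"
      · subst hi
        by_cases hct : d.contains b
        · -- duplicate slot: both sides false
          rw [if_pos]
          · simp [pvAltLoop, hct]
          · right
            intro hnd
            rw [pvInforms_triple, if_pos rfl, List.map_append, List.nodup_append] at hnd
            have hb : b ∈ List.map Prod.fst d.items :=
              (PySem.Dict.contains_iff_mem_keys d b).mp hct
            exact hnd.2.2 b hb b (by simp) rfl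
        · by_cases hden : (b, c) ∈ den
          · rw [if_pos]
            · simp [pvAltLoop, hden]
            · left
              exact ⟨(b, c), by simp [pvInforms_triple], Or.inl hden⟩
          · have hctf : d.contains b = false := by simpa using hct
            have hitems := PySem.Dict.items_insert_of_not_contains d c hctf
            have hk' : (d.insert b c).keys.Nodup := PySem.Dict.nodup_keys_insert d b c hk
            have hc' : ∀ p ∈ (d.insert b c).items, p ∉ den := by
              intro p hp
              rw [hitems, List.mem_append] at hp
              rcases hp with hp | hp
              · exact hc p hp
              · simp at hp; subst hp; exact hden
            have hrec := ih aff neg (d.insert b c) den hk' hc'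
            rw [hitems, List.append_assoc] at hrec
            simpa [pvAltLoop, hctf, hden, pvInforms_triple, pvDenies_triple] using hrec
      · by_cases hd : a = "deny"
        · subst hd
          by_cases hgv : d.get? b = some c
          · rw [if_pos]
            · simp [pvAltLoop, hgv]
            · left
              refine ⟨(b, c), ?_, Or.inr (by simp [pvDenies_triple])⟩
              simp [PySem.Dict.mem_items_of_get?_eq_some d hgv]
          · have hc' : ∀ p ∈ d.items, p ∉ den.add (b, c) := by
              intro p hp hmem
              rw [PySem.Set.mem_add] at hmem
              rcases hmem with hmem | hmem
              · exact hc p hp hmem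
              · subst hmem
                exact hgv (PySem.Dict.get?_of_mem_items d hp hk)
            have step : pvAltLoop (["deny", b, c] :: rest) aff neg d den =
                pvAltLoop rest aff neg d (den.add (b, c)) := by
              simp [pvAltLoop, hgv]
            have hinf : pvInforms (["deny", b, c] :: rest) = pvInforms rest := by
              rw [pvInforms_triple, if_neg (by decide)]
            have hden2 : pvDenies (["deny", b, c] :: rest) = (b, c) :: pvDenies rest := by
              rw [pvDenies_triple, if_pos rfl]
            rw [step, ih aff neg d (den.add (b, c)) hk hc', hinf, hden2]
            refine if_congr (or_congr (exists_congr fun p => and_congr Iff.rfl ?_) Iff.rfl) rfl ?_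
            · rw [PySem.Set.mem_add, List.mem_cons]
              tauto
            · simp
        · have hinf : pvInforms ([a, b, c] :: rest) = pvInforms rest := by
            rw [pvInforms_triple, if_neg hi]
          have hden2 : pvDenies ([a, b, c] :: rest) = pvDenies rest := by
            rw [pvDenies_triple, if_neg hd]
          rw [show pvAltLoop ([a, b, c] :: rest) aff neg d den =
              pvAltLoop rest aff neg d den from by simp [pvAltLoop, hi, hd], hinf, hden2]
          simpa using ih aff neg d den hk hc
    · simpa [pvAltLoop, pvInforms, pvDenies] using ih aff neg d den hk hc

theorem makes_valid_act_eq (tuples : List (List String)) :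
    makes_valid_act tuples =
      if ["affirm"] ∈ tuples ∧ ["negate"] ∈ tuples then false
      else if (∃ p ∈ pvInforms tuples, p ∈ pvDenies tuples)
          ∨ ¬ ((pvInforms tuples).map Prod.fst).Nodup
      then false else true := by
  unfold makes_valid_act
  by_cases hAN : ["affirm"] ∈ tuples ∧ ["negate"] ∈ tuples
  · simp [hAN.1, hAN.2]
  · rw [if_neg hAN]
    have hcf : (tuples.contains ["affirm"] && tuples.contains ["negate"]) = false := by
      rcases Decidable.not_and_iff_not_or_not.mp hAN with h | h <;> simp [h]
    rw [hcf]
    simp only [if_false, filt_informs, filt_denies]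
    by_cases h1 : ∃ p ∈ pvInforms tuples, p ∈ pvDenies tuples
    · have hany : (pvInforms tuples).any (fun sv => (pvDenies tuples).contains sv) = true := by
        simpa [List.any_eq_true] using h1
      simp [hany, h1]
    · have hany : (pvInforms tuples).any (fun sv => (pvDenies tuples).contains sv) = false := by
        simp only [Bool.eq_false_iff, ne_eq, List.any_eq_true]
        intro hcon
        exact h1 (by simpa using hcon)
      by_cases h2 : ((pvInforms tuples).map Prod.fst).Nodup
      · have hl := (len_ofList_eq_iff ((pvInforms tuples).map (fun sv => sv.1))).mpr (by simpa using h2)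
        simp [hany, h1, h2, hl]
      · have hlt := len_ofList_lt ((pvInforms tuples).map (fun sv => sv.1)) (by simpa using h2)
        simp only [List.length_map] at hlt
        simp [hany, h1, h2]
        omega

-- ===== VERDICT (by name: the statement is the Claim_ definition above) =====
theorem makes_valid_act_spec : Claim_equal_makes_valid_act := by
  intro tuples _
  show makes_valid_act tuples = makes_valid_act_alt tuples
  unfold makes_valid_act_alt
  rw [pvAltLoop_eq tuples false false PySem.Dict.empty PySem.Set.empty
      (by simp [PySem.Dict.empty, PySem.Dict.keys]) (by simp [PySem.Set.empty]),
    makes_valid_act_eq]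
  simp only [PySem.Dict.empty, PySem.Set.empty, List.nil_append, List.not_mem_nil,
    false_or, Bool.false_or]
  by_cases hAN : ["affirm"] ∈ tuples ∧ ["negate"] ∈ tuples
  · rw [if_pos hAN]
    split
    · rfl
    · simp [hAN.1, hAN.2]
  · rw [if_neg hAN]
    have hX : (!(decide (["affirm"] ∈ tuples) && decide (["negate"] ∈ tuples))) = true := by
      by_cases h : ["affirm"] ∈ tuples
      · have : ¬ (["negate"] ∈ tuples) := fun h2 => hAN ⟨h, h2⟩
        simp [h, this]
      · simp [h]
    rw [hX]
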